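-- pv_equiv track=rewrite | github.com/rbystrit/memstream | primitive_io/generator/generate_bitpackers.py | writer_set_bits
-- ===== SOURCE A (Python) =====
-- def writer_set_bits(bit_address, source, count, little_endian=True):
--     start_byte = bit_address // 8
--     next_byte_boundary = (start_byte + 1) * 8
--     current_byte_boundary = start_byte * 8
--     orig_count = count
--     output = []
--
--     while count > 0:
--         num_bits = min(next_byte_boundary - bit_address, count)
--
--         if little_endian:
--             bits_source = "(({source} >> {count}) & {bitmask})".format(source=source, count=orig_count - count,
--                                                                        bitmask=(2 ** num_bits - 1))
--             bits_source = "({bits_source}) << {pos}".format(bits_source=bits_source,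
--                                                             pos=bit_address - current_byte_boundary)
--         else:
--             bits_source = "(({source} >> {count}) & {bitmask})".format(source=source, count=count - num_bits,
--                                                                        bitmask=(2 ** num_bits - 1))
--
--             bits_source = "({bits_source}) << {pos}".format(bits_source=bits_source,
--                                                             pos=8 - (bit_address - current_byte_boundary) - num_bits)
--         output.append((start_byte, bits_source))
--
--         count -= num_bits
--         start_byte += 1
--         next_byte_boundary = (start_byte + 1) * 8
--         current_byte_boundary = start_byte * 8
--         bit_address = min(current_byte_boundary, bit_address + num_bits)
--
--     return bit_address, output
-- ===== SOURCE B (Python) =====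
-- def writer_set_bits(bit_address, source, count, little_endian=True):
--     if count <= 0:
--         return bit_address, []
--     # stage 1: chunk sizes (head partial byte, full bytes, tail partial byte)
--     head = min(8 - bit_address % 8, count)
--     rem = count - head
--     sizes = [head] + [8] * (rem // 8) + ([rem % 8] if rem % 8 else [])
--     # stage 2: running prefix sums of consumed bits
--     offsets, t = [0], 0
--     for s in sizes:
--         t += s
--         offsets.append(t)
--     # stage 3: byte indices and in-byte positions, then one zip comprehension
--     ks = range(bit_address // 8, bit_address // 8 + len(sizes))
--     ps = [bit_address % 8] + [0] * (len(sizes) - 1)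
--     entries = [(k, "((({} >> {}) & {})) << {}".format(
--                    source,
--                    c0 if little_endian else count - c1,
--                    2 ** nb - 1,
--                    p if little_endian else 8 - p - nb))
--                for k, nb, c0, c1, p in zip(ks, sizes, offsets, offsets[1:], ps)]
--     return bit_address + count, entries
-- ===== Notes on version B (the rewrite author's own statement) =====
-- stated objective: alternative
-- what changed: B replaces A's stateful while-loop (mutating count, bit_address, start_byte and two byte boundaries each iteration) by staged passes: it first builds the chunk-size list in closed form ([head] + [8]*middle + [tail]), then a prefix-sum pass for consumed-bit offsets, then formats everything in one zip comprehension over sizes/offsets/positions/byte indices.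
import Mathlib
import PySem

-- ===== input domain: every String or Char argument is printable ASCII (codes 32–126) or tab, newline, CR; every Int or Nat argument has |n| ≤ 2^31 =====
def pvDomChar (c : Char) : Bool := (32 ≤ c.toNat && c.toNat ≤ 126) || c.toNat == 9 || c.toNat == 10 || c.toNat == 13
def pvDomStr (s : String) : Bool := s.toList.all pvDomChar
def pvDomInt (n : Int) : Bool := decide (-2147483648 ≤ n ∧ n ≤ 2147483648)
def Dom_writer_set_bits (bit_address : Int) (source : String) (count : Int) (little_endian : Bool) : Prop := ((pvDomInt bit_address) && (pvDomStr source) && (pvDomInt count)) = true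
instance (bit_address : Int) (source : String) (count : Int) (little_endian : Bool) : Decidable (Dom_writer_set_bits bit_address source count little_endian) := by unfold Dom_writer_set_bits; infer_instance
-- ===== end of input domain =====

-- B replaces A's stateful while-loop by staged passes: a closed-form chunk-size list,
-- a prefix-sum pass, and one zip comprehension (objective: alternative); same return value everywhere.

-- ===== PORT A =====
-- the while-loop of A; fuel = the Nat count of remaining iterations bound (totality guard only:
-- each iteration consumes at least one bit, so fuel = count.toNat never runs out)
def wsbLoopA (source : String) (little_endian : Bool) (orig_count : Int) :
    Nat → Int → Int → Int → Int → Int → List (Int × String) → Int × List (Int × String)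
  | 0, bit_address, _, _, _, _, output => (bit_address, output)
  | fuel + 1, bit_address, count, start_byte, next_byte_boundary, current_byte_boundary, output =>
    if 0 < count then
      let num_bits : Int := min (next_byte_boundary - bit_address) count
      let bits_source : String :=
        if little_endian then
          let s := "((" ++ source ++ " >> " ++ PySem.Int.toStr (orig_count - count) ++ ") & " ++
            PySem.Int.toStr ((2 : Int) ^ num_bits.toNat - 1) ++ ")"
          "(" ++ s ++ ") << " ++ PySem.Int.toStr (bit_address - current_byte_boundary)
        else
          let s := "((" ++ source ++ " >> " ++ PySem.Int.toStr (count - num_bits) ++ ") & " ++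
            PySem.Int.toStr ((2 : Int) ^ num_bits.toNat - 1) ++ ")"
          "(" ++ s ++ ") << " ++ PySem.Int.toStr (8 - (bit_address - current_byte_boundary) - num_bits)
      let output' := output ++ [(start_byte, bits_source)]
      let count' := count - num_bits
      let start_byte' := start_byte + 1
      wsbLoopA source little_endian orig_count fuel
        (min (start_byte' * 8) (bit_address + num_bits)) count' start_byte'
        ((start_byte' + 1) * 8) (start_byte' * 8) output'
    else (bit_address, output)

def writer_set_bits (bit_address : Int) (source : String) (count : Int) (little_endian : Bool) : Int × (List (Int × String)) :=
  let start_byte := PySem.Int.floordiv bit_address 8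
  wsbLoopA source little_endian count count.toNat bit_address count start_byte
    ((start_byte + 1) * 8) (start_byte * 8) []

-- ===== PORT B =====
def writer_set_bits_alt (bit_address : Int) (source : String) (count : Int) (little_endian : Bool) : Int × (List (Int × String)) :=
  if count ≤ 0 then (bit_address, [])
  else
    -- stage 1: chunk sizes (head partial byte, full bytes, tail partial byte)
    let head := min (8 - PySem.Int.mod bit_address 8) count
    let rem := count - head
    let sizes : List Int := [head] ++ List.replicate (PySem.Int.floordiv rem 8).toNat 8 ++
      (if PySem.Int.mod rem 8 ≠ 0 then [PySem.Int.mod rem 8] else [])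
    -- stage 2: running prefix sums of consumed bits
    let offsets := (sizes.foldl (fun (st : List Int × Int) s => (st.1 ++ [st.2 + s], st.2 + s))
      (([0] : List Int), (0 : Int))).1
    -- stage 3: byte indices and in-byte positions, then one zip comprehension
    let ks := PySem.List.pyRange (PySem.Int.floordiv bit_address 8)
      (PySem.Int.floordiv bit_address 8 + (sizes.length : Int)) 1
    let ps : List Int := [PySem.Int.mod bit_address 8] ++ List.replicate (sizes.length - 1) 0
    let entries := (ks.zip (sizes.zip ((offsets.zip ((PySem.List.slice offsets (some 1) none).zip ps))))).map
      (fun x : Int × (Int × (Int × (Int × Int))) =>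
        -- tuple unpacking of the comprehension: x = (k, nb, c0, c1, p)
        (x.1, "(((" ++ source ++ " >> " ++ PySem.Int.toStr (if little_endian then x.2.2.1 else count - x.2.2.2.1) ++
          ") & " ++ PySem.Int.toStr ((2 : Int) ^ x.2.1.toNat - 1) ++ ")) << " ++
          PySem.Int.toStr (if little_endian then x.2.2.2.2 else 8 - x.2.2.2.2 - x.2.1)))
    (bit_address + count, entries)

-- ===== PRECONDITION & SPEC =====
def Spec_writer_set_bits (bit_address : Int) (source : String) (count : Int) (little_endian : Bool) (out : Int × (List (Int × String))) : Prop := out = writer_set_bits_alt bit_address source count little_endian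
instance (bit_address : Int) (source : String) (count : Int) (little_endian : Bool) (out : Int × (List (Int × String))) : Decidable (Spec_writer_set_bits bit_address source count little_endian out) := by unfold Spec_writer_set_bits; infer_instance

-- ===== CLAIM (what is proved, stated in full; the proofs are below) =====
def Claim_equal_writer_set_bits : Prop := ∀ (bit_address : Int) (source : String) (count : Int) (little_endian : Bool), Dom_writer_set_bits bit_address source count little_endian → Spec_writer_set_bits bit_address source count little_endian (writer_set_bits bit_address source count little_endian)

-- ===== LEMMAS AND PROOFS =====

-- the sequence of chunk sizes starting at in-byte position p with r bits left
def pvChunks (p r : Int) : List Int :=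
  if h : 0 < r ∧ p < 8 then
    min (8 - p) r :: pvChunks 0 (r - min (8 - p) r)
  else []
termination_by r.toNat
decreasing_by omega

-- reference formatter: one entry per chunk (k byte index, off bits consumed so far, p in-byte pos)
def pvFmt (src : String) (le : Bool) (C : Int) : Int → Int → Int → List Int → List (Int × String)
  | _, _, _, [] => []
  | k, off, p, nb :: rest =>
    (k, "(((" ++ src ++ " >> " ++ PySem.Int.toStr (if le then off else C - (off + nb)) ++
      ") & " ++ PySem.Int.toStr ((2 : Int) ^ nb.toNat - 1) ++ ")) << " ++
      PySem.Int.toStr (if le then p else 8 - p - nb)) :: pvFmt src le C (k + 1) (off + nb) 0 rest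

-- prefix sums of sizes starting from t (excluding t itself)
def pvPre (t : Int) : List Int → List Int
  | [] => []
  | s :: r => (t + s) :: pvPre (t + s) r

lemma pvStr_left (X : String) : "(" ++ ("((" ++ X) = "(((" ++ X := by
  rw [← String.append_assoc]; exact congrArg (· ++ X) rfl

lemma pvStr_right : (")" : String) ++ ") << " = ")) << " := rfl

-- A's two-step string build equals the one-step "(((…)) << " build
lemma pvParen (s c m : String) :
    "(" ++ ("((" ++ s ++ " >> " ++ c ++ ") & " ++ m ++ ")") ++ ") << "
      = "(((" ++ s ++ " >> " ++ c ++ ") & " ++ m ++ ")) << " := by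
  simp only [String.append_assoc]
  rw [pvStr_right, pvStr_left]

lemma wsbLoopA_nonpos (source : String) (le : Bool) (C : Int) (fuel : Nat)
    (ba cnt sb nbb cbb : Int) (out : List (Int × String)) (h : ¬ 0 < cnt) :
    wsbLoopA source le C fuel ba cnt sb nbb cbb out = (ba, out) := by
  cases fuel with
  | zero => rfl
  | succ f => simp only [wsbLoopA, if_neg h]

-- A's loop computes the reference formatting of the chunk sequence
lemma wsbLoopA_eq (src : String) (le : Bool) (C : Int) :
    ∀ (fuel : Nat) (ba cnt k : Int) (out : List (Int × String)),
      0 < cnt → cnt ≤ (fuel : Int) → k * 8 ≤ ba → ba < (k + 1) * 8 → cnt ≤ C →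
      wsbLoopA src le C fuel ba cnt k ((k + 1) * 8) (k * 8) out =
        (ba + cnt, out ++ pvFmt src le C k (C - cnt) (ba - k * 8) (pvChunks (ba - k * 8) cnt)) := by
  intro fuel
  induction fuel with
  | zero =>
    intro ba cnt k out h1 h2 _ _ _
    exact absurd h1 (by simpa using h2)
  | succ f ih =>
    intro ba cnt k out h1 h2 hk1 hk2 hC
    have hp : ba - k * 8 < 8 := by omega
    simp only [wsbLoopA, if_pos h1]
    rw [pvChunks, dif_pos ⟨h1, hp⟩]
    have hmin : min (8 - (ba - k * 8)) cnt = min ((k + 1) * 8 - ba) cnt := by omega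
    rw [hmin]
    set nb : Int := min ((k + 1) * 8 - ba) cnt with hnb
    have hnb1 : (1 : Int) ≤ nb := by omega
    rw [pvFmt]
    have e4 : C - (C - cnt + nb) = cnt - nb := by omega
    rw [e4]
    by_cases hpos : 0 < cnt - nb
    · have hba' : min ((k + 1) * 8) (ba + nb) = (k + 1) * 8 := by omega
      have hnbv : nb = (k + 1) * 8 - ba := by omega
      rw [hba', ih ((k + 1) * 8) (cnt - nb) (k + 1) _ hpos (by omega) (by omega) (by omega)
        (by omega)]
      have e1 : (k + 1) * 8 + (cnt - nb) = ba + cnt := by omega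
      have e2 : C - (cnt - nb) = C - cnt + nb := by omega
      have e3 : (k + 1) * 8 - (k + 1) * 8 = (0 : Int) := by omega
      rw [e1, e2, e3]
      cases le <;> simp [List.append_assoc, pvParen]
    · have hnbc : nb = cnt := by omega
      rw [wsbLoopA_nonpos _ _ _ _ _ _ _ _ _ _ (by omega)]
      have hba' : min ((k + 1) * 8) (ba + nb) = ba + cnt := by omega
      have hnil : pvChunks 0 (cnt - nb) = [] := by
        rw [pvChunks, dif_neg (by omega)]
      rw [hba', hnil, pvFmt]
      cases le <;> simp [pvParen]

-- the closed-form middle+tail of B equals the chunk sequence from position 0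
lemma pvChunks_zero (r : Int) (hr : 0 ≤ r) :
    pvChunks 0 r = List.replicate ((r / 8).toNat) 8 ++ (if r % 8 ≠ 0 then [r % 8] else []) := by
  by_cases h : 0 < r
  · rw [pvChunks, dif_pos ⟨h, by omega⟩]
    by_cases h8 : 8 ≤ r
    · have hm : min (8 - (0 : Int)) r = 8 := by omega
      rw [hm, pvChunks_zero (r - 8) (by omega)]
      have hd : (r / 8).toNat = ((r - 8) / 8).toNat + 1 := by omega
      have hm8 : (r - 8) % 8 = r % 8 := by omega
      rw [hd, hm8, List.replicate_succ]
      simp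
    · have hm : min (8 - (0 : Int)) r = r := by omega
      have hd : (r / 8).toNat = 0 := by omega
      have hmr : r % 8 = r := by omega
      rw [hm, hd, hmr, pvChunks, dif_neg (by omega), if_pos (by omega)]
      simp
  · have hr0 : r = 0 := by omega
    subst hr0
    rw [pvChunks, dif_neg (by omega)]
    simp
termination_by r.toNat
decreasing_by omega

-- B's offsets fold builds the prefix-sum list
lemma pvFold_offsets (sizes : List Int) :
    ∀ (acc : List Int) (t : Int),
      (sizes.foldl (fun (st : List Int × Int) s => (st.1 ++ [st.2 + s], st.2 + s)) (acc, t)) =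
        (acc ++ pvPre t sizes, t + sizes.sum) := by
  induction sizes with
  | nil => intro acc t; simp [pvPre]
  | cons s rest ih =>
    intro acc t
    simp only [List.foldl_cons, ih, pvPre, List.sum_cons, Prod.mk.injEq]
    exact ⟨by simp, by ring⟩

-- B's zip comprehension over sizes/offsets/positions equals the reference formatting
lemma pvZip_eq (src : String) (le : Bool) (C : Int) :
    ∀ (sizes : List Int) (k t p : Int),
      ((PySem.List.pyRange k (k + (sizes.length : Int)) 1).zip
        (sizes.zip (((t :: pvPre t sizes).zip ((pvPre t sizes).zip
          (p :: List.replicate (sizes.length - 1) 0)))))).map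
        (fun x : Int × (Int × (Int × (Int × Int))) =>
          (x.1, "(((" ++ src ++ " >> " ++ PySem.Int.toStr (if le then x.2.2.1 else C - x.2.2.2.1) ++
            ") & " ++ PySem.Int.toStr ((2 : Int) ^ x.2.1.toNat - 1) ++ ")) << " ++
            PySem.Int.toStr (if le then x.2.2.2.2 else 8 - x.2.2.2.2 - x.2.1)))
      = pvFmt src le C k t p sizes := by
  intro sizes
  induction sizes with
  | nil =>
    intro k t p
    rw [show k + ((List.length (α := Int) []) : Int) = k by simp,
      PySem.List.pyRange_one_eq_nil (le_refl k)]
    simp [pvFmt]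
  | cons s rest ih =>
    intro k t p
    have hlen : k + (((s :: rest).length : Int)) = k + 1 + ((rest.length : Int)) := by
      push_cast [List.length_cons]
      ring
    rw [hlen, PySem.List.pyRange_one_cons (by
      have : (0 : Int) ≤ (rest.length : Int) := Int.natCast_nonneg _
      omega)]
    simp only [pvPre, List.zip_cons_cons, List.map_cons]
    rw [pvFmt]
    congr 1
    cases rest with
    | nil =>
      rw [show k + 1 + ((List.length (α := Int) []) : Int) = k + 1 by simp,
        PySem.List.pyRange_one_eq_nil (le_refl (k + 1))]
      simp [pvFmt]
    | cons s' rest' =>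
      have hrepl : List.replicate ((s :: s' :: rest').length - 1) (0 : Int) =
          0 :: List.replicate ((s' :: rest').length - 1) 0 := by
        simp [List.replicate_succ]
      rw [hrepl]
      exact ih (k + 1) (t + s) 0

-- B for positive count, in terms of the reference chunk sequence and formatter
lemma pvAlt_pos (ba : Int) (src : String) (cnt : Int) (le : Bool) (h : 0 < cnt) :
    writer_set_bits_alt ba src cnt le =
      (ba + cnt, pvFmt src le cnt (ba / 8) 0 (ba % 8) (pvChunks (ba % 8) cnt)) := by
  unfold writer_set_bits_alt
  rw [if_neg (by omega)]
  have hm : PySem.Int.mod ba 8 = ba % 8 := PySem.Int.mod_eq_emod_of_pos (by omega)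
  have hf : PySem.Int.floordiv ba 8 = ba / 8 := PySem.Int.floordiv_eq_ediv_of_pos (by omega)
  have hf2 : PySem.Int.floordiv (cnt - min (8 - ba % 8) cnt) 8 =
      (cnt - min (8 - ba % 8) cnt) / 8 := PySem.Int.floordiv_eq_ediv_of_pos (by omega)
  have hm2 : PySem.Int.mod (cnt - min (8 - ba % 8) cnt) 8 =
      (cnt - min (8 - ba % 8) cnt) % 8 := PySem.Int.mod_eq_emod_of_pos (by omega)
  simp only [hm, hf, hf2, hm2]
  have hchunks : pvChunks (ba % 8) cnt =
      [min (8 - ba % 8) cnt] ++ List.replicate (((cnt - min (8 - ba % 8) cnt) / 8).toNat) 8 ++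
        (if (cnt - min (8 - ba % 8) cnt) % 8 ≠ 0 then [(cnt - min (8 - ba % 8) cnt) % 8]
         else []) := by
    rw [pvChunks, dif_pos ⟨h, by omega⟩,
      pvChunks_zero (cnt - min (8 - (ba % 8)) cnt) (by omega)]
    simp
  rw [hchunks]
  simp only [pvFold_offsets, List.singleton_append, PySem.List.slice_from_one, List.tail_cons]
  rw [pvZip_eq]

-- ===== VERDICT (by name: the statement is the Claim_ definition above) =====
theorem writer_set_bits_spec : Claim_equal_writer_set_bits := by
  intro ba src cnt le _
  unfold Spec_writer_set_bits
  by_cases h : 0 < cnt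
  · have hfd : PySem.Int.floordiv ba 8 = ba / 8 := PySem.Int.floordiv_eq_ediv_of_pos (by omega)
    unfold writer_set_bits
    rw [hfd,
      wsbLoopA_eq src le cnt cnt.toNat ba cnt (ba / 8) [] h (by omega) (by omega) (by omega)
        (le_refl _),
      pvAlt_pos ba src cnt le h]
    have e1 : cnt - cnt = (0 : Int) := by omega
    have e2 : ba - ba / 8 * 8 = ba % 8 := by omega
    rw [e1, e2]
    simp
  · unfold writer_set_bits writer_set_bits_alt
    rw [wsbLoopA_nonpos _ _ _ _ _ _ _ _ _ _ h, if_pos (by omega)]
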